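-- pv_equiv track=rewrite | github.com/PinkHood-xv/salat | parsers/syslog_parser.py | determine_syslog_event_type
-- ===== SOURCE A (Python) =====
-- def determine_syslog_event_type(tag, message):
--     """Determine specific event type from syslog tag and message"""
--     tag_lower = tag.lower() if tag else ''
--     message_lower = message.lower()
--
--     # SSH events
--     if 'ssh' in tag_lower or 'sshd' in tag_lower:
--         if any(keyword in message_lower for keyword in ['failed', 'invalid', 'authentication failure']):
--             return 'ssh_failed_login'
--         elif any(keyword in message_lower for keyword in ['accepted', 'session opened']):
--             return 'ssh_successful_login'
--         else:
--             return 'ssh_event'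
--
--     # Authentication events
--     if any(keyword in tag_lower for keyword in ['auth', 'login', 'su', 'sudo']):
--         if any(keyword in message_lower for keyword in ['failed', 'failure', 'invalid']):
--             return 'authentication_failure'
--         elif any(keyword in message_lower for keyword in ['success', 'accepted', 'opened']):
--             return 'authentication_success'
--         else:
--             return 'authentication'
--
--     # Firewall events
--     if any(keyword in tag_lower for keyword in ['firewall', 'iptables', 'pf']):
--         if any(keyword in message_lower for keyword in ['drop', 'deny', 'block']):
--             return 'firewall_drop'
--         elif any(keyword in message_lower for keyword in ['accept', 'allow']):
--             return 'firewall_allow'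
--         else:
--             return 'firewall_event'
--
--     # Web server events
--     if any(keyword in tag_lower for keyword in ['apache', 'nginx', 'httpd']):
--         return 'web_server'
--
--     # System events
--     if any(keyword in tag_lower for keyword in ['kernel', 'systemd', 'init']):
--         return 'system_event'
--
--     return 'syslog'
-- ===== SOURCE B (Python) =====
-- _TAG_RANK = {'ssh': 0, 'sshd': 0,
--              'auth': 1, 'login': 1, 'su': 1, 'sudo': 1,
--              'firewall': 2, 'iptables': 2, 'pf': 2,
--              'apache': 3, 'nginx': 3, 'httpd': 3,
--              'kernel': 4, 'systemd': 4, 'init': 4}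
--
-- _MSG_RANK = {
--     0: {'failed': 0, 'invalid': 0, 'authentication failure': 0,
--         'accepted': 1, 'session opened': 1},
--     1: {'failed': 0, 'failure': 0, 'invalid': 0,
--         'success': 1, 'accepted': 1, 'opened': 1},
--     2: {'drop': 0, 'deny': 0, 'block': 0,
--         'accept': 1, 'allow': 1},
-- }
--
-- _LABELS = {
--     0: ['ssh_failed_login', 'ssh_successful_login', 'ssh_event'],
--     1: ['authentication_failure', 'authentication_success', 'authentication'],
--     2: ['firewall_drop', 'firewall_allow', 'firewall_event'],
--     3: ['web_server', 'web_server', 'web_server'],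
--     4: ['system_event', 'system_event', 'system_event'],
-- }
--
--
-- def determine_syslog_event_type(tag, message):
--     """Determine specific event type from syslog tag and message.
--
--     Scans ALL keywords, aggregating the minimum priority rank of the matches
--     (argmin over a keyword->rank map), instead of an ordered branch cascade:
--     taking the minimum category rank among every matching tag keyword picks
--     exactly the first category an ordered scan would pick, and likewise the
--     minimum outcome rank among matching message keywords picks the first
--     matching message sub-rule; the (category, outcome) pair then indexes a
--     label table."""
--     tag_lower = tag.lower() if tag else ''
--     message_lower = message.lower()
--     cat = min((r for k, r in _TAG_RANK.items() if k in tag_lower), default=None)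
--     if cat is None:
--         return 'syslog'
--     out = min((r for k, r in _MSG_RANK.get(cat, {}).items() if k in message_lower),
--               default=2)
--     return _LABELS[cat][out]
-- ===== Notes on version B (the rewrite author's own statement) =====
-- stated objective: alternative
-- what changed: Replaced A's ordered if/elif keyword cascades by rank aggregation: a keyword->priority-rank map is scanned in full, the minimum rank among all matching tag keywords selects the category, likewise the minimum rank among matching message keywords selects the outcome, and the (category, outcome) pair indexes a label table.
import Mathlib
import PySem

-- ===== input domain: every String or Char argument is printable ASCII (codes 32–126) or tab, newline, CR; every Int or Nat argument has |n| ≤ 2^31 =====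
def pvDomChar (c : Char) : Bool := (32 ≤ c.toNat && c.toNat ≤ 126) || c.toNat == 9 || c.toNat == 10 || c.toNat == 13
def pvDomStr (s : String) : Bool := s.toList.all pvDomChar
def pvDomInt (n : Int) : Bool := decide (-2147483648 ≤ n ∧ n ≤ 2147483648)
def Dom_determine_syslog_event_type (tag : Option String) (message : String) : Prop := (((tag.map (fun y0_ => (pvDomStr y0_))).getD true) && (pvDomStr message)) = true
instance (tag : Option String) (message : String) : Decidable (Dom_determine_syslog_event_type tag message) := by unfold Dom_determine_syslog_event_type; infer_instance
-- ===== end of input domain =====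

-- B replaces A's ordered branch cascade by a rank-aggregation scan: every keyword
-- carries a priority rank, and the minimum rank among ALL matches selects the
-- category/outcome (objective: alternative); same return value everywhere.

-- ===== PORT A =====
-- B replaces A's ordered branch cascade by a rank-aggregation scan (min priority
-- rank over all keyword matches, then a label-table lookup); objective: alternative.
def determine_syslog_event_type (tag : Option String) (message : String) : String :=
  let tag_lower : String := match tag with
    | some t => if t = "" then "" else PySem.Str.lower t
    | none => ""
  let message_lower := PySem.Str.lower message
  if PySem.Str.isIn "ssh" tag_lower || PySem.Str.isIn "sshd" tag_lower then
    if ["failed", "invalid", "authentication failure"].any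
        (fun k => PySem.Str.isIn k message_lower) then "ssh_failed_login"
    else if ["accepted", "session opened"].any
        (fun k => PySem.Str.isIn k message_lower) then "ssh_successful_login"
    else "ssh_event"
  else if ["auth", "login", "su", "sudo"].any (fun k => PySem.Str.isIn k tag_lower) then
    if ["failed", "failure", "invalid"].any
        (fun k => PySem.Str.isIn k message_lower) then "authentication_failure"
    else if ["success", "accepted", "opened"].any
        (fun k => PySem.Str.isIn k message_lower) then "authentication_success"
    else "authentication"
  else if ["firewall", "iptables", "pf"].any (fun k => PySem.Str.isIn k tag_lower) then
    if ["drop", "deny", "block"].any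
        (fun k => PySem.Str.isIn k message_lower) then "firewall_drop"
    else if ["accept", "allow"].any
        (fun k => PySem.Str.isIn k message_lower) then "firewall_allow"
    else "firewall_event"
  else if ["apache", "nginx", "httpd"].any (fun k => PySem.Str.isIn k tag_lower) then
    "web_server"
  else if ["kernel", "systemd", "init"].any (fun k => PySem.Str.isIn k tag_lower) then
    "system_event"
  else "syslog"

-- ===== PORT B =====
-- Source B's keyword -> priority-rank dict for tags (association list, insertion order)
def tagRankTable : List (String × Int) :=
  [("ssh", 0), ("sshd", 0), ("auth", 1), ("login", 1), ("su", 1), ("sudo", 1), ("firewall", 2), ("iptables", 2), ("pf", 2), ("apache", 3), ("nginx", 3), ("httpd", 3), ("kernel", 4), ("systemd", 4), ("init", 4)]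

-- Source B's _MSG_RANK: category -> (message keyword -> outcome rank)
def msgRankTable : List (Int × List (String × Int)) :=
  [(0, [("failed", 0), ("invalid", 0), ("authentication failure", 0), ("accepted", 1), ("session opened", 1)]),
   (1, [("failed", 0), ("failure", 0), ("invalid", 0), ("success", 1), ("accepted", 1), ("opened", 1)]),
   (2, [("drop", 0), ("deny", 0), ("block", 0), ("accept", 1), ("allow", 1)])]

-- Source B's _LABELS: category -> labels indexed by outcome rank
def labelTable : List (Int × List String) :=
  [(0, ["ssh_failed_login", "ssh_successful_login", "ssh_event"]),
   (1, ["authentication_failure", "authentication_success", "authentication"]),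
   (2, ["firewall_drop", "firewall_allow", "firewall_event"]),
   (3, ["web_server", "web_server", "web_server"]),
   (4, ["system_event", "system_event", "system_event"])]

-- one step of Source B's min aggregation: keep the smaller rank if the keyword matches
def minStep (text : String) (acc : Option Int) (p : String × Int) : Option Int :=
  if PySem.Str.isIn p.1 text then
    match acc with
    | none => some p.2
    | some b => some (min b p.2)
  else acc

-- Source B's min((r for k, r in table if k in text), default=None)
def minMatch? (text : String) (table : List (String × Int)) : Option Int :=
  table.foldl (minStep text) none

-- dict lookup with default (Source B's _MSG_RANK.get(cat, {}) / _LABELS[cat])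
def lookupIntD {α : Type} (t : List (Int × α)) (k : Int) (d : α) : α :=
  match t.find? (fun p => p.1 == k) with
  | some p => p.2
  | none => d

-- Source B's _LABELS[cat][out]; out is always a valid index ("" is an unreachable total-function guard)
def idxD (l : List String) (i : Int) : String :=
  match PySem.List.pyGet? l i with
  | some s => s
  | none => ""

def determine_syslog_event_type_alt (tag : Option String) (message : String) : String :=
  let tag_lower : String := match tag with
    | some t => if t = "" then "" else PySem.Str.lower t
    | none => ""
  let message_lower := PySem.Str.lower message
  match minMatch? tag_lower tagRankTable with
  | none => "syslog"
  | some cat =>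
      let out := (minMatch? message_lower (lookupIntD msgRankTable cat [])).getD 2
      idxD (lookupIntD labelTable cat []) out

-- ===== PRECONDITION & SPEC =====
def Spec_determine_syslog_event_type (tag : Option String) (message : String) (out : String) : Prop := out = determine_syslog_event_type_alt tag message
instance (tag : Option String) (message : String) (out : String) : Decidable (Spec_determine_syslog_event_type tag message out) := by unfold Spec_determine_syslog_event_type; infer_instance

-- ===== CLAIM (what is proved, stated in full; the proofs are below) =====
def Claim_equal_determine_syslog_event_type : Prop := ∀ (tag : Option String) (message : String), Dom_determine_syslog_event_type tag message → Spec_determine_syslog_event_type tag message (determine_syslog_event_type tag message)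

-- ===== LEMMAS AND PROOFS =====

-- once the accumulator holds v and every remaining rank is ≥ v, the fold keeps v
theorem foldl_minStep_some (text : String) (v : Int) :
    ∀ (table : List (String × Int)), (∀ p ∈ table, v ≤ p.2) →
      table.foldl (minStep text) (some v) = some v
  | [], _ => rfl
  | p :: rest, h => by
    rw [List.foldl_cons]
    have hstep : minStep text (some v) p = some v := by
      unfold minStep
      split_ifs
      · show some (min v p.2) = some v
        rw [min_eq_left (h p (by simp))]
      · rfl
    rw [hstep]
    exact foldl_minStep_some text v rest (fun q hq => h q (List.mem_cons_of_mem _ hq))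

-- the min-rank scan over the tag table equals first-matching-group selection
theorem minMatch_tag (tl : String) :
    minMatch? tl tagRankTable =
      (if PySem.Str.isIn "ssh" tl || (PySem.Str.isIn "sshd" tl) then some 0
       else if PySem.Str.isIn "auth" tl || (PySem.Str.isIn "login" tl || (PySem.Str.isIn "su" tl || (PySem.Str.isIn "sudo" tl))) then some 1
       else if PySem.Str.isIn "firewall" tl || (PySem.Str.isIn "iptables" tl || (PySem.Str.isIn "pf" tl)) then some 2
       else if PySem.Str.isIn "apache" tl || (PySem.Str.isIn "nginx" tl || (PySem.Str.isIn "httpd" tl)) then some 3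
       else if PySem.Str.isIn "kernel" tl || (PySem.Str.isIn "systemd" tl || (PySem.Str.isIn "init" tl)) then some 4
       else none) := by
  unfold tagRankTable
  unfold minMatch?
  rw [List.foldl_cons]
  by_cases h0 : PySem.Str.isIn "ssh" tl = true
  · rw [show minStep tl none ("ssh", 0) = some 0 from by simp only [minStep]; rw [if_pos h0]]
    rw [foldl_minStep_some tl 0 [("sshd", 0), ("auth", 1), ("login", 1), ("su", 1), ("sudo", 1), ("firewall", 2), ("iptables", 2), ("pf", 2), ("apache", 3), ("nginx", 3), ("httpd", 3), ("kernel", 4), ("systemd", 4), ("init", 4)] (by decide)]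
    simp_all
  rw [show minStep tl none ("ssh", 0) = none from by simp only [minStep]; rw [if_neg h0]]
  rw [List.foldl_cons]
  by_cases h1 : PySem.Str.isIn "sshd" tl = true
  · rw [show minStep tl none ("sshd", 0) = some 0 from by simp only [minStep]; rw [if_pos h1]]
    rw [foldl_minStep_some tl 0 [("auth", 1), ("login", 1), ("su", 1), ("sudo", 1), ("firewall", 2), ("iptables", 2), ("pf", 2), ("apache", 3), ("nginx", 3), ("httpd", 3), ("kernel", 4), ("systemd", 4), ("init", 4)] (by decide)]
    simp_all
  rw [show minStep tl none ("sshd", 0) = none from by simp only [minStep]; rw [if_neg h1]]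
  rw [List.foldl_cons]
  by_cases h2 : PySem.Str.isIn "auth" tl = true
  · rw [show minStep tl none ("auth", 1) = some 1 from by simp only [minStep]; rw [if_pos h2]]
    rw [foldl_minStep_some tl 1 [("login", 1), ("su", 1), ("sudo", 1), ("firewall", 2), ("iptables", 2), ("pf", 2), ("apache", 3), ("nginx", 3), ("httpd", 3), ("kernel", 4), ("systemd", 4), ("init", 4)] (by decide)]
    simp_all
  rw [show minStep tl none ("auth", 1) = none from by simp only [minStep]; rw [if_neg h2]]
  rw [List.foldl_cons]
  by_cases h3 : PySem.Str.isIn "login" tl = true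
  · rw [show minStep tl none ("login", 1) = some 1 from by simp only [minStep]; rw [if_pos h3]]
    rw [foldl_minStep_some tl 1 [("su", 1), ("sudo", 1), ("firewall", 2), ("iptables", 2), ("pf", 2), ("apache", 3), ("nginx", 3), ("httpd", 3), ("kernel", 4), ("systemd", 4), ("init", 4)] (by decide)]
    simp_all
  rw [show minStep tl none ("login", 1) = none from by simp only [minStep]; rw [if_neg h3]]
  rw [List.foldl_cons]
  by_cases h4 : PySem.Str.isIn "su" tl = true
  · rw [show minStep tl none ("su", 1) = some 1 from by simp only [minStep]; rw [if_pos h4]]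
    rw [foldl_minStep_some tl 1 [("sudo", 1), ("firewall", 2), ("iptables", 2), ("pf", 2), ("apache", 3), ("nginx", 3), ("httpd", 3), ("kernel", 4), ("systemd", 4), ("init", 4)] (by decide)]
    simp_all
  rw [show minStep tl none ("su", 1) = none from by simp only [minStep]; rw [if_neg h4]]
  rw [List.foldl_cons]
  by_cases h5 : PySem.Str.isIn "sudo" tl = true
  · rw [show minStep tl none ("sudo", 1) = some 1 from by simp only [minStep]; rw [if_pos h5]]
    rw [foldl_minStep_some tl 1 [("firewall", 2), ("iptables", 2), ("pf", 2), ("apache", 3), ("nginx", 3), ("httpd", 3), ("kernel", 4), ("systemd", 4), ("init", 4)] (by decide)]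
    simp_all
  rw [show minStep tl none ("sudo", 1) = none from by simp only [minStep]; rw [if_neg h5]]
  rw [List.foldl_cons]
  by_cases h6 : PySem.Str.isIn "firewall" tl = true
  · rw [show minStep tl none ("firewall", 2) = some 2 from by simp only [minStep]; rw [if_pos h6]]
    rw [foldl_minStep_some tl 2 [("iptables", 2), ("pf", 2), ("apache", 3), ("nginx", 3), ("httpd", 3), ("kernel", 4), ("systemd", 4), ("init", 4)] (by decide)]
    simp_all
  rw [show minStep tl none ("firewall", 2) = none from by simp only [minStep]; rw [if_neg h6]]
  rw [List.foldl_cons]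
  by_cases h7 : PySem.Str.isIn "iptables" tl = true
  · rw [show minStep tl none ("iptables", 2) = some 2 from by simp only [minStep]; rw [if_pos h7]]
    rw [foldl_minStep_some tl 2 [("pf", 2), ("apache", 3), ("nginx", 3), ("httpd", 3), ("kernel", 4), ("systemd", 4), ("init", 4)] (by decide)]
    simp_all
  rw [show minStep tl none ("iptables", 2) = none from by simp only [minStep]; rw [if_neg h7]]
  rw [List.foldl_cons]
  by_cases h8 : PySem.Str.isIn "pf" tl = true
  · rw [show minStep tl none ("pf", 2) = some 2 from by simp only [minStep]; rw [if_pos h8]]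
    rw [foldl_minStep_some tl 2 [("apache", 3), ("nginx", 3), ("httpd", 3), ("kernel", 4), ("systemd", 4), ("init", 4)] (by decide)]
    simp_all
  rw [show minStep tl none ("pf", 2) = none from by simp only [minStep]; rw [if_neg h8]]
  rw [List.foldl_cons]
  by_cases h9 : PySem.Str.isIn "apache" tl = true
  · rw [show minStep tl none ("apache", 3) = some 3 from by simp only [minStep]; rw [if_pos h9]]
    rw [foldl_minStep_some tl 3 [("nginx", 3), ("httpd", 3), ("kernel", 4), ("systemd", 4), ("init", 4)] (by decide)]
    simp_all
  rw [show minStep tl none ("apache", 3) = none from by simp only [minStep]; rw [if_neg h9]]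
  rw [List.foldl_cons]
  by_cases h10 : PySem.Str.isIn "nginx" tl = true
  · rw [show minStep tl none ("nginx", 3) = some 3 from by simp only [minStep]; rw [if_pos h10]]
    rw [foldl_minStep_some tl 3 [("httpd", 3), ("kernel", 4), ("systemd", 4), ("init", 4)] (by decide)]
    simp_all
  rw [show minStep tl none ("nginx", 3) = none from by simp only [minStep]; rw [if_neg h10]]
  rw [List.foldl_cons]
  by_cases h11 : PySem.Str.isIn "httpd" tl = true
  · rw [show minStep tl none ("httpd", 3) = some 3 from by simp only [minStep]; rw [if_pos h11]]
    rw [foldl_minStep_some tl 3 [("kernel", 4), ("systemd", 4), ("init", 4)] (by decide)]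
    simp_all
  rw [show minStep tl none ("httpd", 3) = none from by simp only [minStep]; rw [if_neg h11]]
  rw [List.foldl_cons]
  by_cases h12 : PySem.Str.isIn "kernel" tl = true
  · rw [show minStep tl none ("kernel", 4) = some 4 from by simp only [minStep]; rw [if_pos h12]]
    rw [foldl_minStep_some tl 4 [("systemd", 4), ("init", 4)] (by decide)]
    simp_all
  rw [show minStep tl none ("kernel", 4) = none from by simp only [minStep]; rw [if_neg h12]]
  rw [List.foldl_cons]
  by_cases h13 : PySem.Str.isIn "systemd" tl = true
  · rw [show minStep tl none ("systemd", 4) = some 4 from by simp only [minStep]; rw [if_pos h13]]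
    rw [foldl_minStep_some tl 4 [("init", 4)] (by decide)]
    simp_all
  rw [show minStep tl none ("systemd", 4) = none from by simp only [minStep]; rw [if_neg h13]]
  rw [List.foldl_cons]
  by_cases h14 : PySem.Str.isIn "init" tl = true
  · rw [show minStep tl none ("init", 4) = some 4 from by simp only [minStep]; rw [if_pos h14]]
    rw [List.foldl_nil]
    simp_all
  rw [show minStep tl none ("init", 4) = none from by simp only [minStep]; rw [if_neg h14]]
  rw [List.foldl_nil]
  simp_all

theorem minMatch_msg0 (ml : String) :
    minMatch? ml [("failed", 0), ("invalid", 0), ("authentication failure", 0), ("accepted", 1), ("session opened", 1)] =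
      (if PySem.Str.isIn "failed" ml || (PySem.Str.isIn "invalid" ml || (PySem.Str.isIn "authentication failure" ml)) then some 0
       else if PySem.Str.isIn "accepted" ml || (PySem.Str.isIn "session opened" ml) then some 1
       else none) := by
  unfold minMatch?
  rw [List.foldl_cons]
  by_cases h0 : PySem.Str.isIn "failed" ml = true
  · rw [show minStep ml none ("failed", 0) = some 0 from by simp only [minStep]; rw [if_pos h0]]
    rw [foldl_minStep_some ml 0 [("invalid", 0), ("authentication failure", 0), ("accepted", 1), ("session opened", 1)] (by decide)]
    simp_all
  rw [show minStep ml none ("failed", 0) = none from by simp only [minStep]; rw [if_neg h0]]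
  rw [List.foldl_cons]
  by_cases h1 : PySem.Str.isIn "invalid" ml = true
  · rw [show minStep ml none ("invalid", 0) = some 0 from by simp only [minStep]; rw [if_pos h1]]
    rw [foldl_minStep_some ml 0 [("authentication failure", 0), ("accepted", 1), ("session opened", 1)] (by decide)]
    simp_all
  rw [show minStep ml none ("invalid", 0) = none from by simp only [minStep]; rw [if_neg h1]]
  rw [List.foldl_cons]
  by_cases h2 : PySem.Str.isIn "authentication failure" ml = true
  · rw [show minStep ml none ("authentication failure", 0) = some 0 from by simp only [minStep]; rw [if_pos h2]]
    rw [foldl_minStep_some ml 0 [("accepted", 1), ("session opened", 1)] (by decide)]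
    simp_all
  rw [show minStep ml none ("authentication failure", 0) = none from by simp only [minStep]; rw [if_neg h2]]
  rw [List.foldl_cons]
  by_cases h3 : PySem.Str.isIn "accepted" ml = true
  · rw [show minStep ml none ("accepted", 1) = some 1 from by simp only [minStep]; rw [if_pos h3]]
    rw [foldl_minStep_some ml 1 [("session opened", 1)] (by decide)]
    simp_all
  rw [show minStep ml none ("accepted", 1) = none from by simp only [minStep]; rw [if_neg h3]]
  rw [List.foldl_cons]
  by_cases h4 : PySem.Str.isIn "session opened" ml = true
  · rw [show minStep ml none ("session opened", 1) = some 1 from by simp only [minStep]; rw [if_pos h4]]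
    rw [List.foldl_nil]
    simp_all
  rw [show minStep ml none ("session opened", 1) = none from by simp only [minStep]; rw [if_neg h4]]
  rw [List.foldl_nil]
  simp_all

theorem minMatch_msg1 (ml : String) :
    minMatch? ml [("failed", 0), ("failure", 0), ("invalid", 0), ("success", 1), ("accepted", 1), ("opened", 1)] =
      (if PySem.Str.isIn "failed" ml || (PySem.Str.isIn "failure" ml || (PySem.Str.isIn "invalid" ml)) then some 0
       else if PySem.Str.isIn "success" ml || (PySem.Str.isIn "accepted" ml || (PySem.Str.isIn "opened" ml)) then some 1
       else none) := by
  unfold minMatch?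
  rw [List.foldl_cons]
  by_cases h0 : PySem.Str.isIn "failed" ml = true
  · rw [show minStep ml none ("failed", 0) = some 0 from by simp only [minStep]; rw [if_pos h0]]
    rw [foldl_minStep_some ml 0 [("failure", 0), ("invalid", 0), ("success", 1), ("accepted", 1), ("opened", 1)] (by decide)]
    simp_all
  rw [show minStep ml none ("failed", 0) = none from by simp only [minStep]; rw [if_neg h0]]
  rw [List.foldl_cons]
  by_cases h1 : PySem.Str.isIn "failure" ml = true
  · rw [show minStep ml none ("failure", 0) = some 0 from by simp only [minStep]; rw [if_pos h1]]
    rw [foldl_minStep_some ml 0 [("invalid", 0), ("success", 1), ("accepted", 1), ("opened", 1)] (by decide)]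
    simp_all
  rw [show minStep ml none ("failure", 0) = none from by simp only [minStep]; rw [if_neg h1]]
  rw [List.foldl_cons]
  by_cases h2 : PySem.Str.isIn "invalid" ml = true
  · rw [show minStep ml none ("invalid", 0) = some 0 from by simp only [minStep]; rw [if_pos h2]]
    rw [foldl_minStep_some ml 0 [("success", 1), ("accepted", 1), ("opened", 1)] (by decide)]
    simp_all
  rw [show minStep ml none ("invalid", 0) = none from by simp only [minStep]; rw [if_neg h2]]
  rw [List.foldl_cons]
  by_cases h3 : PySem.Str.isIn "success" ml = true
  · rw [show minStep ml none ("success", 1) = some 1 from by simp only [minStep]; rw [if_pos h3]]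
    rw [foldl_minStep_some ml 1 [("accepted", 1), ("opened", 1)] (by decide)]
    simp_all
  rw [show minStep ml none ("success", 1) = none from by simp only [minStep]; rw [if_neg h3]]
  rw [List.foldl_cons]
  by_cases h4 : PySem.Str.isIn "accepted" ml = true
  · rw [show minStep ml none ("accepted", 1) = some 1 from by simp only [minStep]; rw [if_pos h4]]
    rw [foldl_minStep_some ml 1 [("opened", 1)] (by decide)]
    simp_all
  rw [show minStep ml none ("accepted", 1) = none from by simp only [minStep]; rw [if_neg h4]]
  rw [List.foldl_cons]
  by_cases h5 : PySem.Str.isIn "opened" ml = true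
  · rw [show minStep ml none ("opened", 1) = some 1 from by simp only [minStep]; rw [if_pos h5]]
    rw [List.foldl_nil]
    simp_all
  rw [show minStep ml none ("opened", 1) = none from by simp only [minStep]; rw [if_neg h5]]
  rw [List.foldl_nil]
  simp_all

theorem minMatch_msg2 (ml : String) :
    minMatch? ml [("drop", 0), ("deny", 0), ("block", 0), ("accept", 1), ("allow", 1)] =
      (if PySem.Str.isIn "drop" ml || (PySem.Str.isIn "deny" ml || (PySem.Str.isIn "block" ml)) then some 0
       else if PySem.Str.isIn "accept" ml || (PySem.Str.isIn "allow" ml) then some 1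
       else none) := by
  unfold minMatch?
  rw [List.foldl_cons]
  by_cases h0 : PySem.Str.isIn "drop" ml = true
  · rw [show minStep ml none ("drop", 0) = some 0 from by simp only [minStep]; rw [if_pos h0]]
    rw [foldl_minStep_some ml 0 [("deny", 0), ("block", 0), ("accept", 1), ("allow", 1)] (by decide)]
    simp_all
  rw [show minStep ml none ("drop", 0) = none from by simp only [minStep]; rw [if_neg h0]]
  rw [List.foldl_cons]
  by_cases h1 : PySem.Str.isIn "deny" ml = true
  · rw [show minStep ml none ("deny", 0) = some 0 from by simp only [minStep]; rw [if_pos h1]]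
    rw [foldl_minStep_some ml 0 [("block", 0), ("accept", 1), ("allow", 1)] (by decide)]
    simp_all
  rw [show minStep ml none ("deny", 0) = none from by simp only [minStep]; rw [if_neg h1]]
  rw [List.foldl_cons]
  by_cases h2 : PySem.Str.isIn "block" ml = true
  · rw [show minStep ml none ("block", 0) = some 0 from by simp only [minStep]; rw [if_pos h2]]
    rw [foldl_minStep_some ml 0 [("accept", 1), ("allow", 1)] (by decide)]
    simp_all
  rw [show minStep ml none ("block", 0) = none from by simp only [minStep]; rw [if_neg h2]]
  rw [List.foldl_cons]
  by_cases h3 : PySem.Str.isIn "accept" ml = true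
  · rw [show minStep ml none ("accept", 1) = some 1 from by simp only [minStep]; rw [if_pos h3]]
    rw [foldl_minStep_some ml 1 [("allow", 1)] (by decide)]
    simp_all
  rw [show minStep ml none ("accept", 1) = none from by simp only [minStep]; rw [if_neg h3]]
  rw [List.foldl_cons]
  by_cases h4 : PySem.Str.isIn "allow" ml = true
  · rw [show minStep ml none ("allow", 1) = some 1 from by simp only [minStep]; rw [if_pos h4]]
    rw [List.foldl_nil]
    simp_all
  rw [show minStep ml none ("allow", 1) = none from by simp only [minStep]; rw [if_neg h4]]
  rw [List.foldl_nil]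
  simp_all

theorem main_eq (tag : Option String) (message : String) :
    determine_syslog_event_type tag message = determine_syslog_event_type_alt tag message := by
  unfold determine_syslog_event_type determine_syslog_event_type_alt
  simp only [List.any_cons, List.any_nil, Bool.or_false]
  rw [minMatch_tag]
  split_ifs <;>
    simp_all [minMatch_msg0, minMatch_msg1, minMatch_msg2,
      show lookupIntD msgRankTable 0 [] = [("failed", 0), ("invalid", 0), ("authentication failure", 0), ("accepted", 1), ("session opened", 1)] from rfl,
      show lookupIntD msgRankTable 1 [] = [("failed", 0), ("failure", 0), ("invalid", 0), ("success", 1), ("accepted", 1), ("opened", 1)] from rfl,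
      show lookupIntD msgRankTable 2 [] = [("drop", 0), ("deny", 0), ("block", 0), ("accept", 1), ("allow", 1)] from rfl] <;>
    rfl

-- ===== VERDICT (by name: the statement is the Claim_ definition above) =====
theorem determine_syslog_event_type_spec : Claim_equal_determine_syslog_event_type := by
  intro tag message _
  unfold Spec_determine_syslog_event_type
  exact main_eq tag message
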